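-- pv_equiv track=rewrite | github.com/Timsbim/AoC | 2022/day_21.py | descendents
-- ===== SOURCE A (Python) =====
-- def descendents(numbers, mathers, root="humn"):
--     descendents = set()
--     next_shift = [root]
--     while next_shift:
--         new_next_shift = []
--         for number in next_shift:
--             for monkey in mathers:
--                 func = mathers[monkey]
--                 if number == func[0] or number == func[1]:
--                     descendents.add(monkey)
--                     new_next_shift.append(monkey)
--         next_shift = new_next_shift
--     return descendents
-- ===== SOURCE B (Python) =====
-- def descendents(numbers, mathers, root="humn"):
--     # Reverse index: operand -> monkeys that use it, in dict order; then BFS with a visited set.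
--     index = {}
--     for monkey, func in mathers.items():
--         index.setdefault(func[0], []).append(monkey)
--         index.setdefault(func[1], []).append(monkey)
--     seen = {root}
--     found = []
--     frontier = [root]
--     while frontier:
--         nxt = []
--         for node in frontier:
--             for monkey in index.get(node, ()):
--                 if monkey not in seen:
--                     seen.add(monkey)
--                     found.append(monkey)
--                     nxt.append(monkey)
--         frontier = nxt
--     return set(found)
-- ===== Notes on version B (the rewrite author's own statement) =====
-- stated objective: alternative
-- what changed: A rescans the whole monkey dict for every frontier element and re-appends already-found monkeys to the next frontier (and never terminates when a cycle is reachable from root); B builds a reverse operand-to-monkeys index once and runs a BFS with a visited set, so each monkey is matched by lookup and expanded at most once.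
import Mathlib
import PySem

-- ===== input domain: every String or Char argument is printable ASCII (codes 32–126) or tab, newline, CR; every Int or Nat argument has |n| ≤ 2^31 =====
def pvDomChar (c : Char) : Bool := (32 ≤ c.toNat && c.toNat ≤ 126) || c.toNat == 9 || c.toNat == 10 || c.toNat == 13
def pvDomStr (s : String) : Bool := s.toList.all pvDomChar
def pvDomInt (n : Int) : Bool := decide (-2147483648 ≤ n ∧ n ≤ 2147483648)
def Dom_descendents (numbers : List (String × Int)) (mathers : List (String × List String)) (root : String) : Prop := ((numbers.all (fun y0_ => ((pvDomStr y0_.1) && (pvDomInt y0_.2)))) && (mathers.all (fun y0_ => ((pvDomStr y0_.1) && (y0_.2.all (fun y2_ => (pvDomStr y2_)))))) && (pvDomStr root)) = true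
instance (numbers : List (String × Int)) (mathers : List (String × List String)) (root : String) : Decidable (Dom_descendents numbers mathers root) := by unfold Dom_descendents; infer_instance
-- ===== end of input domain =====

-- B replaces A's rescan of the whole monkey dict per frontier element (with re-expansion of
-- already-found monkeys) by a reverse operand→monkeys index built once and a BFS with a visited
-- set, so each monkey is expanded at most once (objective: alternative).

-- ===== PORT A =====
-- `number == func[0] or number == func[1]` (a short func raises IndexError in Python: none → no
-- match here; Pre_ keeps every func of length ≥ 2, where this is exact).
def pvMatches (f : List String) (x : String) : Bool :=
  (PySem.List.pyGet? f 0 == some x) || (PySem.List.pyGet? f 1 == some x)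

-- the `while next_shift:` loop; fuel (mathers.length + 2) covers every input admitted by Pre_
def aLoop (md : PySem.Dict String (List String)) :
    Nat → PySem.Set String → List String → List String
  | 0, desc, _ => desc
  | fuel + 1, desc, nextShift =>
    if nextShift.isEmpty then desc
    else
      let st := nextShift.foldl (fun st number =>
        md.keys.foldl (fun st monkey =>
          if pvMatches (md.getD monkey []) number then
            (PySem.Set.add st.1 monkey, st.2 ++ [monkey])
          else st) st) (desc, ([] : List String))
      aLoop md fuel st.1 st.2

def descendents (numbers : List (String × Int)) (mathers : List (String × List String)) (root : String) : List String :=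
  aLoop (PySem.Dict.ofList mathers) (mathers.length + 2) PySem.Set.empty [root]

-- ===== PORT B =====
-- index.setdefault(func[0], []).append(monkey); same for func[1] (short funcs are outside Pre_)
def bIndex (mathers : List (String × List String)) : PySem.Dict String (List String) :=
  (PySem.Dict.ofList mathers).items.foldl (fun idx p =>
    let k0 := PySem.List.pyGetD p.2 0 ""
    let idx0 := idx.insert k0 (idx.getD k0 [] ++ [p.1])
    let k1 := PySem.List.pyGetD p.2 1 ""
    idx0.insert k1 (idx0.getD k1 [] ++ [p.1])) PySem.Dict.empty

-- state = (seen, found, frontier); the `while frontier:` loop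
def bLoop (idx : PySem.Dict String (List String)) :
    Nat → PySem.Set String × List String × List String → List String
  | 0, st => st.2.1
  | fuel + 1, st =>
    if st.2.2.isEmpty then st.2.1
    else
      let st' := st.2.2.foldl (fun st node =>
        (idx.getD node []).foldl (fun st monkey =>
          if PySem.Set.contains st.1 monkey then st
          else (PySem.Set.add st.1 monkey, st.2.1 ++ [monkey], st.2.2 ++ [monkey])) st)
        (st.1, st.2.1, ([] : List String))
      bLoop idx fuel st'

def descendents_alt (numbers : List (String × Int)) (mathers : List (String × List String)) (root : String) : List String :=
  PySem.Set.ofList (bLoop (bIndex mathers) (mathers.length + 2) (PySem.Set.ofList [root], [], [root]))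

-- ===== PRECONDITION & SPEC =====
-- monkeys whose func mentions x, in dict order (the edge relation of the dependency graph)
def pvSuccs (mathers : List (String × List String)) (x : String) : List String :=
  (mathers.filter (fun p => pvMatches p.2 x)).map Prod.fst

-- x is reachable from root along pvSuccs edges: x belongs to every subset of root :: keys that
-- contains root and is closed under pvSuccs (a logical characterisation, nothing is simulated)
def pvReachB (mathers : List (String × List String)) (root x : String) : Bool :=
  ((root :: mathers.map Prod.fst).sublists).all (fun R =>
    !(root ∈ R : Bool) || !(R.all (fun u => (pvSuccs mathers u).all (fun v => v ∈ R))) || (x ∈ R : Bool))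

-- Pre_ excludes (a) funcs shorter than 2, on which A raises IndexError (or, when func = [root]
-- keeps matching, loops forever); (b) duplicate monkey names, which no Python dict input can
-- carry; (c) dependency cycles REACHABLE from root, on which A's frontier never empties and A
-- loops forever. Unreachable cycles (A returns normally) satisfy Pre_.
def Pre_descendents (numbers : List (String × Int)) (mathers : List (String × List String)) (root : String) : Prop :=
  (mathers.map Prod.fst).Nodup ∧
  (∀ p ∈ mathers, 2 ≤ p.2.length) ∧
  (∀ S ∈ (mathers.map Prod.fst).sublists, S ≠ [] →
    (∀ x ∈ S, pvReachB mathers root x = true) →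
    ∃ v ∈ S, ∀ u ∈ S, ∀ p ∈ mathers, p.1 = v → pvMatches p.2 u = false)
instance (numbers : List (String × Int)) (mathers : List (String × List String)) (root : String) : Decidable (Pre_descendents numbers mathers root) := by unfold Pre_descendents; infer_instance

def pvWitness_descendents : (List (String × Int)) × (List (String × List String)) × String :=
  ([], [("mnky", ["humn", "abcd"])], "humn")

def Spec_descendents (numbers : List (String × Int)) (mathers : List (String × List String)) (root : String) (out : List String) : Prop := out = descendents_alt numbers mathers root
instance (numbers : List (String × Int)) (mathers : List (String × List String)) (root : String) (out : List String) : Decidable (Spec_descendents numbers mathers root out) := by unfold Spec_descendents; infer_instance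

-- ===== CLAIM (what is proved, stated in full; the proofs are below) =====
def Claim_equal_descendents : Prop := ∀ (numbers : List (String × Int)) (mathers : List (String × List String)) (root : String), Dom_descendents numbers mathers root → Pre_descendents numbers mathers root → Spec_descendents numbers mathers root (descendents numbers mathers root)

-- ===== LEMMAS AND PROOFS =====

-- the same successors with the multiplicity B's index stores (a monkey twice when func[0] = func[1] = x)
def pvISuccs (mathers : List (String × List String)) (x : String) : List String :=
  mathers.flatMap (fun p =>
    (if PySem.List.pyGetD p.2 0 "" = x then [p.1] else []) ++
    (if PySem.List.pyGetD p.2 1 "" = x then [p.1] else []))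

-- first occurrences of elements of l not in seen/done, in order (the new discoveries)
def pvNews (seen : List String) : List String → List String → List String
  | _, [] => []
  | done, x :: l =>
    if x ∈ seen ∨ x ∈ done then pvNews seen done l else x :: pvNews seen (done ++ [x]) l

lemma pvReachB_root (mathers : List (String × List String)) (root : String) :
    pvReachB mathers root root = true := by
  simp only [pvReachB, List.all_eq_true]
  intro R _
  by_cases h : root ∈ R <;> simp [h]

lemma pvReachB_closed (mathers : List (String × List String)) (root u v : String)
    (hu : pvReachB mathers root u = true) (hv : v ∈ pvSuccs mathers u) :
    pvReachB mathers root v = true := by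
  simp only [pvReachB, List.all_eq_true] at hu ⊢
  intro R hR
  have := hu R hR
  by_cases hroot : root ∈ R
  · by_cases hcl : R.all (fun u => (pvSuccs mathers u).all (fun v => decide (v ∈ R))) = true
    · have huR : u ∈ R := by
        simpa [hroot, hcl] using this
      have : (pvSuccs mathers u).all (fun v => decide (v ∈ R)) = true := by
        rw [List.all_eq_true] at hcl
        exact hcl u huR
      rw [List.all_eq_true] at this
      have hvR : v ∈ R := by simpa using this v hv
      simp [hvR]
    · simp [hcl]
  · simp [hroot]

lemma pvNews_congr (seen1 seen2 : List String) :
    ∀ (l d1 d2 : List String), (∀ y ∈ l, (y ∈ seen1 ∨ y ∈ d1) ↔ (y ∈ seen2 ∨ y ∈ d2)) →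
    pvNews seen1 d1 l = pvNews seen2 d2 l := by
  intro l
  induction l with
  | nil => intro d1 d2 _; rfl
  | cons x t ih =>
    intro d1 d2 h
    have hx := h x (by simp)
    by_cases hc : x ∈ seen1 ∨ x ∈ d1
    · rw [pvNews, pvNews, if_pos hc, if_pos (hx.mp hc)]
      exact ih d1 d2 (fun y hy => h y (by simp [hy]))
    · rw [pvNews, pvNews, if_neg hc, if_neg (fun hc2 => hc (hx.mpr hc2))]
      congr 1
      refine ih (d1 ++ [x]) (d2 ++ [x]) (fun y hy => ?_)
      have := h y (by simp [hy])
      simp only [List.mem_append, List.mem_singleton]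
      constructor
      · rintro (h1 | h2 | h3)
        · rcases this.mp (Or.inl h1) with a | a
          · exact Or.inl a
          · exact Or.inr (Or.inl a)
        · rcases this.mp (Or.inr h2) with a | a
          · exact Or.inl a
          · exact Or.inr (Or.inl a)
        · exact Or.inr (Or.inr h3)
      · rintro (h1 | h2 | h3)
        · rcases this.mpr (Or.inl h1) with a | a
          · exact Or.inl a
          · exact Or.inr (Or.inl a)
        · rcases this.mpr (Or.inr h2) with a | a
          · exact Or.inl a
          · exact Or.inr (Or.inl a)
        · exact Or.inr (Or.inr h3)

lemma pvNews_append (seen : List String) :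
    ∀ (a b d : List String),
    pvNews seen d (a ++ b) = pvNews seen d a ++ pvNews seen (d ++ pvNews seen d a) b := by
  intro a
  induction a with
  | nil => intro b d; simp [pvNews]
  | cons x t ih =>
    intro b d
    by_cases hc : x ∈ seen ∨ x ∈ d
    · rw [List.cons_append, pvNews, if_pos hc, pvNews, if_pos hc, ih]
    · rw [List.cons_append, pvNews, if_neg hc, pvNews, if_neg hc, ih]
      simp

lemma pvNews_nil_of (seen : List String) :
    ∀ (l d : List String), (∀ x ∈ l, x ∈ seen ∨ x ∈ d) → pvNews seen d l = [] := by
  intro l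
  induction l with
  | nil => intro d _; rfl
  | cons x t ih =>
    intro d h
    rw [pvNews, if_pos (h x (by simp))]
    exact ih d (fun y hy => h y (by simp [hy]))

lemma pvNews_post (seen : List String) :
    ∀ (l d : List String), ∀ x ∈ l, x ∈ seen ∨ x ∈ d ++ pvNews seen d l := by
  intro l
  induction l with
  | nil => intro d x hx; cases hx
  | cons z t ih =>
    intro d x hx
    by_cases hc : z ∈ seen ∨ z ∈ d
    · rw [pvNews, if_pos hc]
      rcases List.mem_cons.mp hx with rfl | hx'
      · rcases hc with h | h
        · exact Or.inl h
        · exact Or.inr (by simp [h])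
      · exact ih d x hx'
    · rw [pvNews, if_neg hc]
      rcases List.mem_cons.mp hx with rfl | hx'
      · exact Or.inr (by simp)
      · rcases ih (d ++ [z]) x hx' with h | h
        · exact Or.inl h
        · simp only [List.mem_append, List.mem_singleton, List.mem_cons] at h ⊢
          tauto

lemma pvNews_subset (seen : List String) :
    ∀ (l d : List String), ∀ y ∈ pvNews seen d l, y ∈ l ∧ y ∉ seen ∧ y ∉ d := by
  intro l
  induction l with
  | nil => intro d y hy; cases hy
  | cons x t ih =>
    intro d y hy
    by_cases hc : x ∈ seen ∨ x ∈ d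
    · rw [pvNews, if_pos hc] at hy
      obtain ⟨h1, h2, h3⟩ := ih d y hy
      exact ⟨by simp [h1], h2, h3⟩
    · rw [pvNews, if_neg hc] at hy
      rcases List.mem_cons.mp hy with rfl | hy'
      · push_neg at hc; exact ⟨by simp, hc.1, hc.2⟩
      · obtain ⟨h1, h2, h3⟩ := ih (d ++ [x]) y hy'
        simp only [List.mem_append, List.mem_singleton] at h3
        push_neg at h3
        exact ⟨by simp [h1], h2, h3.1⟩

lemma pvNews_nodup (seen : List String) :
    ∀ (l d : List String), (pvNews seen d l).Nodup := by
  intro l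
  induction l with
  | nil => intro d; simp [pvNews]
  | cons x t ih =>
    intro d
    by_cases hc : x ∈ seen ∨ x ∈ d
    · rw [pvNews, if_pos hc]; exact ih d
    · rw [pvNews, if_neg hc]
      refine List.nodup_cons.mpr ⟨fun hx => ?_, ih (d ++ [x])⟩
      have := (pvNews_subset seen t (d ++ [x]) x hx).2.2
      simp at this

lemma pvNews_dup (seen : List String) (d r' : List String) (m : String) :
    pvNews seen d (m :: m :: r') = pvNews seen d (m :: r') := by
  by_cases hc : m ∈ seen ∨ m ∈ d
  · rw [pvNews, if_pos hc]
  · rw [pvNews, if_neg hc, pvNews, if_pos (by simp), pvNews, if_neg hc]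

lemma pvNews_cons_congr (seen : List String) (m : String) (L L' : List String)
    (h : ∀ d, pvNews seen d L = pvNews seen d L') :
    ∀ d, pvNews seen d (m :: L) = pvNews seen d (m :: L') := by
  intro d
  by_cases hc : m ∈ seen ∨ m ∈ d
  · rw [pvNews, if_pos hc, pvNews, if_pos hc]; exact h d
  · rw [pvNews, if_neg hc, pvNews, if_neg hc, h]

lemma pvMatchSplit (f : List String) (hf : 2 ≤ f.length) (x : String) :
    pvMatches f x = true ↔ (PySem.List.pyGetD f 0 "" = x ∨ PySem.List.pyGetD f 1 "" = x) := by
  match f, hf with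
  | a :: b :: t, _ =>
    have h0 : PySem.List.pyGet? (a :: b :: t) 0 = some a := by
      have := PySem.List.pyGet?_natCast (a :: b :: t) 0
      simpa using this
    have h1 : PySem.List.pyGet? (a :: b :: t) 1 = some b := by
      have := PySem.List.pyGet?_natCast (a :: b :: t) 1
      simpa using this
    simp only [pvMatches, h0, h1, PySem.List.pyGetD, Option.getD_some, Bool.or_eq_true, beq_iff_eq, Option.some.injEq]

lemma pvFoldAdd (l : List String) :
    ∀ (d : List String), List.foldl PySem.Set.add d l = d ++ pvNews d [] l := by
  induction l with
  | nil => intro d; simp [pvNews]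
  | cons x t ih =>
    intro d
    by_cases hc : x ∈ d
    · rw [List.foldl_cons, PySem.Set.add_of_mem hc, pvNews, if_pos (by simp [hc]), ih]
    · rw [List.foldl_cons, PySem.Set.add_of_not_mem hc, ih, pvNews, if_neg (by simp [hc])]
      rw [pvNews_congr (d ++ [x]) d t [] [x] (by intro y _; simp)]
      simp

lemma pvUpdateItems {ν : Type} :
    ∀ (l : List (String × ν)) (d : PySem.Dict String ν),
    (∀ p ∈ l, d.contains p.1 = false) → (l.map Prod.fst).Nodup →
    (d.update l).items = d.items ++ l := by
  intro l
  induction l with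
  | nil => intro d _ _; simp [PySem.Dict.update]
  | cons p t ih =>
    intro d hc hn
    have hpc : d.contains p.1 = false := hc p (by simp)
    have : PySem.Dict.update d (p :: t) = PySem.Dict.update (d.insert p.1 p.2) t := by
      simp [PySem.Dict.update]
    rw [this, ih (d.insert p.1 p.2) ?_ (by simpa using hn.sublist (by simp))]
    · rw [PySem.Dict.items_insert_of_not_contains _ _ hpc]
      simp
    · intro q hq
      rw [PySem.Dict.contains_insert]
      have hne : q.1 ≠ p.1 := by
        simp only [List.map_cons, List.nodup_cons] at hn
        intro h
        exact hn.1 (h ▸ List.mem_map_of_mem hq)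
      simp [hne, hc q (by simp [hq])]

lemma pvItemsOfList {ν : Type} (l : List (String × ν)) (h : (l.map Prod.fst).Nodup) :
    (PySem.Dict.ofList l).items = l := by
  have := pvUpdateItems l PySem.Dict.empty (fun p _ => by simp [PySem.Dict.contains_empty]) h
  simpa [PySem.Dict.ofList, PySem.Dict.empty] using this

lemma pvAScan (md : PySem.Dict String (List String)) (x : String) :
    ∀ (l : List (String × List String)) (st : PySem.Set String × List String),
    (∀ p ∈ l, md.getD p.1 [] = p.2) →
    (l.map Prod.fst).foldl (fun st monkey =>
        if pvMatches (md.getD monkey []) x then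
          (PySem.Set.add st.1 monkey, st.2 ++ [monkey])
        else st) st
      = (List.foldl PySem.Set.add st.1 (pvSuccs l x), st.2 ++ pvSuccs l x) := by
  intro l
  induction l with
  | nil => intro st _; simp [pvSuccs]
  | cons p t ih =>
    intro st h
    have hp : md.getD p.1 [] = p.2 := h p (by simp)
    by_cases hm : pvMatches p.2 x
    · rw [List.map_cons, List.foldl_cons]
      simp only [hp, hm, if_pos]
      rw [ih _ (fun q hq => h q (by simp [hq]))]
      have : pvSuccs (p :: t) x = p.1 :: pvSuccs t x := by
        simp [pvSuccs, List.filter_cons, hm]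
      rw [this]
      simp
    · rw [List.map_cons, List.foldl_cons]
      simp only [hp, hm, if_neg, Bool.false_eq_true, not_false_iff]
      rw [ih _ (fun q hq => h q (by simp [hq]))]
      have : pvSuccs (p :: t) x = pvSuccs t x := by
        simp [pvSuccs, List.filter_cons, hm]
      rw [this]

lemma pvIdxFold (l : List (String × List String)) :
    ∀ (idx : PySem.Dict String (List String)) (x : String),
    (l.foldl (fun idx p =>
      let k0 := PySem.List.pyGetD p.2 0 ""
      let idx0 := idx.insert k0 (idx.getD k0 [] ++ [p.1])
      let k1 := PySem.List.pyGetD p.2 1 ""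
      idx0.insert k1 (idx0.getD k1 [] ++ [p.1])) idx).getD x []
      = idx.getD x [] ++ pvISuccs l x := by
  induction l with
  | nil => intro idx x; simp [pvISuccs]
  | cons p t ih =>
    intro idx x
    rw [List.foldl_cons, ih]
    have hI : pvISuccs (p :: t) x =
        ((if PySem.List.pyGetD p.2 0 "" = x then [p.1] else []) ++
         (if PySem.List.pyGetD p.2 1 "" = x then [p.1] else [])) ++ pvISuccs t x := by
      simp [pvISuccs]
    rw [hI]
    simp only [PySem.Dict.getD_insert]
    split_ifs <;> (try subst_eqs) <;> simp_all

lemma pvIdxGetD (mathers : List (String × List String)) (h : (mathers.map Prod.fst).Nodup) (x : String) :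
    (bIndex mathers).getD x [] = pvISuccs mathers x := by
  rw [bIndex, pvItemsOfList mathers h, pvIdxFold]
  simp [PySem.Dict.getD_empty]

lemma pvBFold :
    ∀ (l s fd nx : List String),
    l.foldl (fun st monkey =>
        if PySem.Set.contains st.1 monkey then st
        else (PySem.Set.add st.1 monkey, st.2.1 ++ [monkey], st.2.2 ++ [monkey]))
      ((s, fd, nx) : PySem.Set String × List String × List String)
      = (s ++ pvNews s [] l, fd ++ pvNews s [] l, nx ++ pvNews s [] l) := by
  intro l
  induction l with
  | nil => intro s fd nx; simp [pvNews]
  | cons m t ih =>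
    intro s fd nx
    by_cases hm : m ∈ s
    · rw [List.foldl_cons]
      have hc : PySem.Set.contains s m = true := by
        simp [PySem.Set.contains_eq_listContains, hm]
      simp only [hc, if_pos]
      rw [ih, pvNews, if_pos (by simp [hm])]
    · rw [List.foldl_cons]
      have hc : PySem.Set.contains s m = false := by
        simp [PySem.Set.contains_eq_listContains, hm]
      simp only [hc, Bool.false_eq_true, if_neg, not_false_iff]
      rw [PySem.Set.add_of_not_mem hm, ih, pvNews, if_neg (by simp [hm])]
      rw [pvNews_congr (s ++ [m]) s t [] [m] (by intro y _; simp)]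
      simp

lemma pvBLayer (mathers : List (String × List String)) (h : (mathers.map Prod.fst).Nodup) :
    ∀ (front : List String) (s fd nx : List String),
    front.foldl (fun st node =>
        ((bIndex mathers).getD node []).foldl (fun st monkey =>
          if PySem.Set.contains st.1 monkey then st
          else (PySem.Set.add st.1 monkey, st.2.1 ++ [monkey], st.2.2 ++ [monkey])) st)
        ((s, fd, nx) : PySem.Set String × List String × List String)
      = (s ++ pvNews s [] (front.flatMap (pvISuccs mathers)),
         fd ++ pvNews s [] (front.flatMap (pvISuccs mathers)),
         nx ++ pvNews s [] (front.flatMap (pvISuccs mathers))) := by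
  intro front
  induction front with
  | nil => intro s fd nx; simp [pvNews]
  | cons node t ih =>
    intro s fd nx
    rw [List.foldl_cons, pvIdxGetD mathers h, pvBFold, ih]
    have hflat : (node :: t).flatMap (pvISuccs mathers)
        = pvISuccs mathers node ++ t.flatMap (pvISuccs mathers) := by simp
    rw [hflat, pvNews_append]
    have hcg : ∀ (l : List String), pvNews (s ++ pvNews s [] (pvISuccs mathers node)) [] l
        = pvNews s ([] ++ pvNews s [] (pvISuccs mathers node)) l := by
      intro l
      exact pvNews_congr _ _ l _ _ (by intro y _; simp)
    rw [hcg]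
    simp

lemma pvNEone (seen : List String) (x : String) :
    ∀ (ps : List (String × List String)), (∀ p ∈ ps, 2 ≤ p.2.length) →
    ∀ (r : List String) (d : List String),
    pvNews seen d (pvISuccs ps x ++ r) = pvNews seen d (pvSuccs ps x ++ r) := by
  intro ps
  induction ps with
  | nil => intro _ r d; simp [pvISuccs, pvSuccs]
  | cons p t ih =>
    intro hlen r d
    have hp : 2 ≤ p.2.length := hlen p (by simp)
    have hI : pvISuccs (p :: t) x ++ r =
        ((if PySem.List.pyGetD p.2 0 "" = x then [p.1] else []) ++
         (if PySem.List.pyGetD p.2 1 "" = x then [p.1] else [])) ++ (pvISuccs t x ++ r) := by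
      simp [pvISuccs]
    have hS0 : pvSuccs (p :: t) x = (if pvMatches p.2 x then [p.1] else []) ++ pvSuccs t x := by
      simp [pvSuccs, List.filter_cons]
      split_ifs <;> simp
    have ihr : ∀ d', pvNews seen d' (pvISuccs t x ++ r) = pvNews seen d' (pvSuccs t x ++ r) :=
      fun d' => ih (fun q hq => hlen q (by simp [hq])) r d'
    by_cases h0 : PySem.List.pyGetD p.2 0 "" = x <;>
      by_cases h1 : PySem.List.pyGetD p.2 1 "" = x
    · have hm : pvMatches p.2 x = true := (pvMatchSplit p.2 hp x).mpr (Or.inl h0)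
      rw [hI, hS0]
      simp only [h0, h1, if_pos, hm, List.cons_append, List.nil_append, List.singleton_append]
      rw [pvNews_dup]
      exact pvNews_cons_congr seen p.1 _ _ ihr d
    · have hm : pvMatches p.2 x = true := (pvMatchSplit p.2 hp x).mpr (Or.inl h0)
      rw [hI, hS0]
      simp only [h0, h1, if_pos, if_neg, hm, List.cons_append, List.nil_append,
        List.append_nil, List.singleton_append]
      exact pvNews_cons_congr seen p.1 _ _ ihr d
    · have hm : pvMatches p.2 x = true := (pvMatchSplit p.2 hp x).mpr (Or.inr h1)
      rw [hI, hS0]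
      simp only [h0, h1, if_pos, if_neg, hm, List.cons_append, List.nil_append, List.singleton_append]
      exact pvNews_cons_congr seen p.1 _ _ ihr d
    · have hm : pvMatches p.2 x = false := by
        by_contra hcon
        have := (pvMatchSplit p.2 hp x).mp (by simpa using hcon)
        tauto
      rw [hI, hS0]
      simp only [h0, h1, hm, if_neg, Bool.false_eq_true, not_false_iff, List.nil_append]
      exact ihr d

lemma pvNE (mathers : List (String × List String)) (hlen : ∀ p ∈ mathers, 2 ≤ p.2.length)
    (seen : List String) :
    ∀ (l d : List String),
    pvNews seen d (l.flatMap (pvISuccs mathers)) = pvNews seen d (l.flatMap (pvSuccs mathers)) := by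
  intro l
  induction l with
  | nil => intro d; rfl
  | cons m t ih =>
    intro d
    have hfa : (m :: t).flatMap (pvISuccs mathers)
        = pvISuccs mathers m ++ t.flatMap (pvISuccs mathers) := by simp
    have hfb : (m :: t).flatMap (pvSuccs mathers)
        = pvSuccs mathers m ++ t.flatMap (pvSuccs mathers) := by simp
    rw [hfa, hfb, pvNEone seen m mathers hlen _ d, pvNews_append, pvNews_append]
    congr 1
    exact ih _

lemma pvG (mathers : List (String × List String)) (seen seenp : List String) :
    ∀ (l dn D : List String),
    (∀ x ∈ l, x ∈ seenp → ∀ m ∈ pvSuccs mathers x, m ∈ seen ∨ m ∈ D) →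
    (∀ x ∈ dn, ∀ m ∈ pvSuccs mathers x, m ∈ seen ∨ m ∈ D) →
    pvNews seen D (l.flatMap (pvSuccs mathers))
      = pvNews seen D ((pvNews seenp dn l).flatMap (pvSuccs mathers)) := by
  intro l
  induction l with
  | nil => intro dn D _ _; rfl
  | cons x t ih =>
    intro dn D h1 h2
    have hfa : (x :: t).flatMap (pvSuccs mathers)
        = pvSuccs mathers x ++ t.flatMap (pvSuccs mathers) := by simp
    by_cases hx : x ∈ seenp ∨ x ∈ dn
    · have hex : ∀ m ∈ pvSuccs mathers x, m ∈ seen ∨ m ∈ D := by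
        rcases hx with hx | hx
        · exact h1 x (by simp) hx
        · exact h2 x hx
      rw [hfa, pvNews_append, pvNews_nil_of seen _ D hex]
      simp only [List.append_nil]
      rw [pvNews, if_pos hx]
      exact ih dn D (fun y hy => h1 y (by simp [hy])) h2
    · rw [hfa, pvNews, if_neg hx]
      have hflat : (x :: pvNews seenp (dn ++ [x]) t).flatMap (pvSuccs mathers)
          = pvSuccs mathers x ++ (pvNews seenp (dn ++ [x]) t).flatMap (pvSuccs mathers) := by
        simp
      rw [hflat, pvNews_append, pvNews_append]
      congr 1
      refine ih (dn ++ [x]) (D ++ pvNews seen D (pvSuccs mathers x)) ?_ ?_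
      · intro y hy hys m hm
        rcases h1 y (by simp [hy]) hys m hm with h | h
        · exact Or.inl h
        · exact Or.inr (by simp [h])
      · intro y hy m hm
        rcases (by simpa using hy : y ∈ dn ∨ y = x) with hyd | rfl
        · rcases h2 y hyd m hm with h | h
          · exact Or.inl h
          · exact Or.inr (by simp [h])
        · exact pvNews_post seen _ D m hm

lemma pvMemSuccs (mathers : List (String × List String)) (u v : String) :
    v ∈ pvSuccs mathers u ↔ ∃ p ∈ mathers, p.1 = v ∧ pvMatches p.2 u = true := by
  simp only [pvSuccs, List.mem_map, List.mem_filter]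
  constructor
  · rintro ⟨p, ⟨hp, hm⟩, rfl⟩; exact ⟨p, hp, rfl, hm⟩
  · rintro ⟨p, hp, rfl, hm⟩; exact ⟨p, ⟨hp, hm⟩, rfl⟩

lemma pvPeel (mathers : List (String × List String)) (root : String)
    (hpre : ∀ S ∈ (mathers.map Prod.fst).sublists, S ≠ [] →
      (∀ x ∈ S, pvReachB mathers root x = true) →
      ∃ v ∈ S, ∀ u ∈ S, ∀ p ∈ mathers, p.1 = v → pvMatches p.2 u = false) :
    ∀ (n : Nat) (S : List String), S.length ≤ n →
    S.Sublist ((mathers.map Prod.fst).filter (fun x => pvReachB mathers root x)) →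
    ∃ r : String → Nat, ∀ u v, u ∈ S → v ∈ S → v ∈ pvSuccs mathers u → r u < r v := by
  intro n
  induction n with
  | zero =>
    intro S hlen _
    have : S = [] := List.eq_nil_of_length_eq_zero (Nat.le_zero.mp hlen)
    subst this
    exact ⟨fun _ => 0, by simp⟩
  | succ n ih =>
    intro S hlen hS
    rcases eq_or_ne S [] with rfl | hne
    · exact ⟨fun _ => 0, by simp⟩
    have hSkeys : S.Sublist (mathers.map Prod.fst) := hS.trans List.filter_sublist
    have hSreach : ∀ x ∈ S, pvReachB mathers root x = true := by
      intro x hx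
      have := hS.subset hx
      exact (List.mem_filter.mp this).2
    obtain ⟨v0, hv0S, hsrc⟩ := hpre S (List.mem_sublists.mpr hSkeys) hne hSreach
    have hS' : (S.erase v0).Sublist ((mathers.map Prod.fst).filter (fun x => pvReachB mathers root x)) :=
      (List.erase_sublist).trans hS
    have hlen' : (S.erase v0).length ≤ n := by
      rw [List.length_erase_of_mem hv0S]
      omega
    obtain ⟨r, hr⟩ := ih (S.erase v0) hlen' hS'
    refine ⟨fun x => if x = v0 then 0 else r x + 1, ?_⟩
    intro u v hu hv hsucc
    rcases eq_or_ne v v0 with rfl | hvne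
    · exfalso
      obtain ⟨p, hp, hp1, hm⟩ := (pvMemSuccs mathers u v).mp hsucc
      have := hsrc u hu p hp hp1
      rw [this] at hm
      cases hm
    · rcases eq_or_ne u v0 with rfl | hune
      · simp only [if_neg hvne]
        simp
      · simp only [if_neg hune, if_neg hvne]
        have := hr u v (List.mem_erase_of_ne hune |>.mpr hu) (List.mem_erase_of_ne hvne |>.mpr hv) hsucc
        omega

lemma pvRank (mathers : List (String × List String)) (root : String)
    (hpre : ∀ S ∈ (mathers.map Prod.fst).sublists, S ≠ [] →
      (∀ x ∈ S, pvReachB mathers root x = true) →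
      ∃ v ∈ S, ∀ u ∈ S, ∀ p ∈ mathers, p.1 = v → pvMatches p.2 u = false) :
    ∃ r : String → Nat, ∀ u v, pvReachB mathers root u = true → v ∈ pvSuccs mathers u → r u < r v := by
  set RK := (mathers.map Prod.fst).filter (fun x => pvReachB mathers root x) with hRK
  obtain ⟨r, hr⟩ := pvPeel mathers root hpre RK.length RK le_rfl (List.Sublist.refl _)
  refine ⟨fun x => if x ∈ RK then r x + 1 else 0, ?_⟩
  intro u v hu hsucc
  have hvk : v ∈ mathers.map Prod.fst := by
    obtain ⟨p, hp, hp1, _⟩ := (pvMemSuccs mathers u v).mp hsucc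
    exact hp1 ▸ List.mem_map_of_mem hp
  have hvR : v ∈ RK := List.mem_filter.mpr ⟨hvk, pvReachB_closed mathers root u v hu hsucc⟩
  by_cases huk : u ∈ RK
  · simp only [if_pos huk, if_pos hvR]
    have := hr u v huk hvR hsucc
    omega
  · simp only [if_neg huk, if_pos hvR]
    omega

-- A's whole layer: one set-adding fold over the concatenated successor lists
lemma pvALayer (mathers : List (String × List String)) :
    ∀ (shift : List String) (st : PySem.Set String × List String),
    shift.foldl (fun st number =>
        (List.foldl PySem.Set.add st.1 (pvSuccs mathers number), st.2 ++ pvSuccs mathers number)) st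
      = (List.foldl PySem.Set.add st.1 (shift.flatMap (pvSuccs mathers)),
         st.2 ++ shift.flatMap (pvSuccs mathers)) := by
  intro shift
  induction shift with
  | nil => intro st; simp
  | cons x t ih =>
    intro st
    rw [List.foldl_cons, ih]
    simp [List.foldl_append]

lemma pvBLoopNil (idx : PySem.Dict String (List String)) :
    ∀ (fuel : Nat) (s fd : List String), bLoop idx fuel (s, fd, []) = fd := by
  intro fuel s fd
  cases fuel <;> simp [bLoop]

-- the bisimulation: A's layered scan and B's indexed BFS agree step for step
lemma pvMain (mathers : List (String × List String)) (root : String)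
    (hk : (mathers.map Prod.fst).Nodup) (hlen : ∀ p ∈ mathers, 2 ≤ p.2.length)
    (r : String → Nat)
    (hr : ∀ u v, pvReachB mathers root u = true → v ∈ pvSuccs mathers u → r u < r v) :
    ∀ (fuel : Nat) (d shift seenp front : List String),
    root :: d = seenp ++ front →
    (∀ x ∈ shift, x ∈ seenp ++ front) →
    (∀ x ∈ seenp, ∀ m ∈ pvSuccs mathers x, m ∈ seenp ++ front) →
    front = pvNews seenp [] shift →
    (∀ x ∈ seenp ++ front, x = root ∨ r root < r x) →
    (∀ x ∈ seenp ++ front, pvReachB mathers root x = true) →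
    (root :: d).Nodup →
    aLoop (PySem.Dict.ofList mathers) fuel d shift
        = bLoop (bIndex mathers) fuel (root :: d, d, front)
      ∧ (aLoop (PySem.Dict.ofList mathers) fuel d shift).Nodup := by
  intro fuel
  induction fuel with
  | zero =>
    intro d shift seenp front _ _ _ _ _ _ I6
    exact ⟨rfl, (List.nodup_cons.mp I6).2⟩
  | succ n ih =>
    intro d shift seenp front I1 I2 I3 I4 I5 I7 I6
    have hkeys : (PySem.Dict.ofList mathers).keys = mathers.map Prod.fst := by
      show ((PySem.Dict.ofList mathers).items.map Prod.fst) = mathers.map Prod.fst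
      rw [pvItemsOfList mathers hk]
    have hgetD : ∀ p ∈ mathers, (PySem.Dict.ofList mathers).getD p.1 [] = p.2 := by
      intro p hp
      refine PySem.Dict.getD_of_mem_items _ ?_ ?_ []
      · rw [pvItemsOfList mathers hk]; exact hp
      · rw [hkeys]; exact hk
    cases shift with
    | nil =>
      have hfront : front = [] := by rw [I4]; rfl
      subst hfront
      rw [show aLoop (PySem.Dict.ofList mathers) (n + 1) d [] = d from by rw [aLoop]; rfl,
        pvBLoopNil]
      exact ⟨rfl, (List.nodup_cons.mp I6).2⟩
    | cons s0 srest =>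
      -- names for the layer quantities
      set seen := seenp ++ front with hseen
      set L := (s0 :: srest).flatMap (pvSuccs mathers) with hL
      set NEW := pvNews seen [] L with hNEW
      -- A's layer
      have hA : aLoop (PySem.Dict.ofList mathers) (n + 1) d (s0 :: srest)
          = aLoop (PySem.Dict.ofList mathers) n (d ++ NEW) L := by
        rw [aLoop]
        simp only [List.isEmpty_cons, Bool.false_eq_true, if_neg, not_false_iff]
        have hscan : ∀ (st : PySem.Set String × List String) (x : String),
            (PySem.Dict.ofList mathers).keys.foldl (fun st monkey =>
              if pvMatches ((PySem.Dict.ofList mathers).getD monkey []) x then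
                (PySem.Set.add st.1 monkey, st.2 ++ [monkey])
              else st) st
            = (List.foldl PySem.Set.add st.1 (pvSuccs mathers x), st.2 ++ pvSuccs mathers x) := by
          intro st x
          rw [hkeys]
          exact pvAScan (PySem.Dict.ofList mathers) x mathers st hgetD
        have hfold : (s0 :: srest).foldl (fun st number =>
              (PySem.Dict.ofList mathers).keys.foldl (fun st monkey =>
                if pvMatches ((PySem.Dict.ofList mathers).getD monkey []) number then
                  (PySem.Set.add st.1 monkey, st.2 ++ [monkey])
                else st) st) ((d : PySem.Set String), ([] : List String))
            = (List.foldl PySem.Set.add d L, L) := by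
          rw [PySem.List.foldl_congr_mem _ _ _ _ (fun st x _ => hscan st x), pvALayer]
          refine Prod.ext ?_ ?_ <;> simp [hL, List.foldl_append]
        rw [hfold]
        have hrootL : root ∉ L := by
          intro hmem
          obtain ⟨y, hy, hys⟩ := List.mem_flatMap.mp hmem
          have hyseen : y ∈ seen := I2 y hy
          have hlt := hr y root (I7 y hyseen) hys
          rcases I5 y hyseen with rfl | hgt
          · omega
          · omega
        have : List.foldl PySem.Set.add d L = d ++ NEW := by
          rw [pvFoldAdd, hNEW, ← I1]
          congr 1
          refine pvNews_congr d (root :: d) L [] [] (fun y hy => ?_)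
          have hyne : y ≠ root := fun h => hrootL (h ▸ hy)
          simp [hyne]
        rw [this]
      -- B's new-discoveries list equals A's
      have hGB : pvNews seen [] (front.flatMap (pvSuccs mathers)) = NEW := by
        rw [I4]
        exact (pvG mathers seen seenp (s0 :: srest) [] []
          (fun x _ hxp m hm => Or.inl (I3 x hxp m hm)) (fun x hx => absurd hx (by simp))).symm
      -- invariants for the next layer
      have I2' : ∀ x ∈ L, x ∈ seen ++ NEW := by
        intro x hx
        obtain ⟨y, hy, hys⟩ := List.mem_flatMap.mp hx
        rcases List.mem_append.mp (I2 y hy) with hyp | hyf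
        · exact List.mem_append.mpr (Or.inl (I3 y hyp x hys))
        · have hxLB : x ∈ front.flatMap (pvSuccs mathers) :=
            List.mem_flatMap.mpr ⟨y, hyf, hys⟩
          rcases pvNews_post seen (front.flatMap (pvSuccs mathers)) [] x hxLB with h | h
          · exact List.mem_append.mpr (Or.inl h)
          · rw [List.nil_append, hGB] at h
            exact List.mem_append.mpr (Or.inr h)
      have I3' : ∀ x ∈ seen, ∀ m ∈ pvSuccs mathers x, m ∈ seen ++ NEW := by
        intro x hx m hm
        rcases List.mem_append.mp hx with hxp | hxf
        · exact List.mem_append.mpr (Or.inl (I3 x hxp m hm))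
        · have hmLB : m ∈ front.flatMap (pvSuccs mathers) :=
            List.mem_flatMap.mpr ⟨x, hxf, hm⟩
          rcases pvNews_post seen (front.flatMap (pvSuccs mathers)) [] m hmLB with h | h
          · exact List.mem_append.mpr (Or.inl h)
          · rw [List.nil_append, hGB] at h
            exact List.mem_append.mpr (Or.inr h)
      have hLreach : ∀ x ∈ L, pvReachB mathers root x = true := by
        intro x hx
        obtain ⟨y, hy, hys⟩ := List.mem_flatMap.mp hx
        exact pvReachB_closed mathers root y x (I7 y (I2 y hy)) hys
      have I5' : ∀ x ∈ seen ++ NEW, x = root ∨ r root < r x := by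
        intro x hx
        rcases List.mem_append.mp hx with h | h
        · exact I5 x h
        · have hxL : x ∈ L := (pvNews_subset seen L [] x h).1
          obtain ⟨y, hy, hys⟩ := List.mem_flatMap.mp hxL
          have hlt := hr y x (I7 y (I2 y hy)) hys
          rcases I5 y (I2 y hy) with rfl | hgt
          · exact Or.inr hlt
          · exact Or.inr (by omega)
      have I7' : ∀ x ∈ seen ++ NEW, pvReachB mathers root x = true := by
        intro x hx
        rcases List.mem_append.mp hx with h | h
        · exact I7 x h
        · exact hLreach x (pvNews_subset seen L [] x h).1
      have I6' : (root :: (d ++ NEW)).Nodup := by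
        have h1 : root :: (d ++ NEW) = (root :: d) ++ NEW := by simp
        rw [h1, I1]
        refine List.Nodup.append (by rw [← I1]; exact I6) (pvNews_nodup seen L []) ?_
        intro a ha hb
        exact (pvNews_subset seen L [] a hb).2.1 ha
      have I1' : root :: (d ++ NEW) = seen ++ NEW := by
        rw [show root :: (d ++ NEW) = (root :: d) ++ NEW from by simp, I1]
      obtain ⟨hind, hnodup⟩ := ih (d ++ NEW) L seen NEW I1' I2' I3' rfl I5' I7' I6'
      refine ⟨?_, by rw [hA]; exact hnodup⟩
      rw [hA, hind]
      -- now reduce B's (n+1)-step to the same state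
      have hNi : pvNews (root :: d) [] (front.flatMap (pvISuccs mathers)) = NEW := by
        rw [I1, pvNE mathers hlen seen, hGB]
      rcases eq_or_ne front [] with hf | hf
      · have hNEWnil : NEW = [] := by
          rw [← hGB, hf]
          rfl
        rw [hf, pvBLoopNil, hNEWnil]
        simp only [List.append_nil]
        rw [pvBLoopNil]
      · have hie : front.isEmpty = false := by
          simp [List.isEmpty_iff, hf]
        have hBstep : bLoop (bIndex mathers) (n + 1) (root :: d, d, front)
            = bLoop (bIndex mathers) n (root :: (d ++ NEW), d ++ NEW, NEW) := by
          rw [bLoop]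
          simp only [hie, Bool.false_eq_true, if_neg, not_false_iff]
          rw [pvBLayer mathers hk front (root :: d) d [], hNi]
          rw [show (root :: d) ++ NEW = root :: (d ++ NEW) from by simp, List.nil_append]
        rw [hBstep]

-- ===== VERDICT (by name: the statement is the Claim_ definition above) =====
theorem descendents_spec : Claim_equal_descendents := by
  intro numbers mathers root _ hpre
  obtain ⟨hk, hlen, hacyc⟩ := hpre
  obtain ⟨r, hr⟩ := pvRank mathers root hacyc
  have hinit := pvMain mathers root hk hlen r hr (mathers.length + 2) [] [root] [] [root]
    (by simp) (by simp) (by simp) (by simp [pvNews]) (by simp)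
    (by
      intro x hx
      have hxr : x = root := by simpa using hx
      exact hxr ▸ pvReachB_root mathers root)
    (by simp)
  unfold Spec_descendents descendents descendents_alt
  have hset : PySem.Set.ofList [root] = [root] := rfl
  have hempty : (PySem.Set.empty : PySem.Set String) = [] := rfl
  rw [hset, hempty, hinit.1]
  have hnodup : (bLoop (bIndex mathers) (mathers.length + 2) ([root], [], [root])).Nodup := by
    rw [← hinit.1]
    exact hinit.2
  rw [PySem.Set.ofList_eq_self_of_nodup _ hnodup]
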